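-- pv_equiv track=rewrite | github.com/zhang614/MicroGrid | MicroGrid/calculateSupply.py | makePeriodic
-- ===== SOURCE A (Python) =====
-- def makePeriodic(unitsPerDay, separation, duration, power):
--     demand = [0 for col in range(unitsPerDay)]
--     for i in range(0, unitsPerDay // separation):
--         for width in range(0, duration + 1):
--             index = i + separation * i + width
--             if index < unitsPerDay:
--                 demand[index] = power
--     return demand
-- ===== SOURCE B (Python) =====
-- def makePeriodic(unitsPerDay, separation, duration, power):
--     # Output-driven single pass: each cell decides from its index whether some
--     # periodic block (start i*(separation+1), width duration+1, i < N) covers it.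
--     n = unitsPerDay // separation   # preserves A's ZeroDivisionError for separation == 0
--     if n <= 0 or unitsPerDay <= 0:
--         return [0] * max(unitsPerDay, 0)
--     stride = separation + 1
--     demand = []
--     for j in range(unitsPerDay):
--         i = min(j // stride, n - 1)
--         demand.append(power if 0 <= j - i * stride <= duration else 0)
--     return demand
-- ===== Notes on version B (the rewrite author's own statement) =====
-- stated objective: alternative
-- what changed: Replaces A's nested block-writing loops (for each block, write each cell) with a single output-driven pass that computes each cell directly from its index via floor division and a clamped block index.
import Mathlib
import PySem

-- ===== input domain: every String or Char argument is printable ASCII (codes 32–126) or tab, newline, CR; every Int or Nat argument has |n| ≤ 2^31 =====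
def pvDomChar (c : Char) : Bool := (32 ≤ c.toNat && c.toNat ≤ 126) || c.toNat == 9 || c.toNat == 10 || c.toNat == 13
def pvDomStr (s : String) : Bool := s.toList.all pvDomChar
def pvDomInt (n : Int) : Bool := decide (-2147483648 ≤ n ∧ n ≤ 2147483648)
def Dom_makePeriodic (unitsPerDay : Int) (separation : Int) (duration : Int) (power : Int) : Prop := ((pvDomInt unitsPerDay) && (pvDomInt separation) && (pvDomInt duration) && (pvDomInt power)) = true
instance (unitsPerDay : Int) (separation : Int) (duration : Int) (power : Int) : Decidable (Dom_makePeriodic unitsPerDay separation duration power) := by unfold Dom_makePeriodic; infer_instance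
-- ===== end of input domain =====

-- B replaces A's nested block-writing loops with a single output-driven pass
-- computing each cell from its index (a different algorithm of similar cost).


-- ===== PORT A =====
-- `demand[index] = power`: under Pre_ (separation ≠ 0) the guard `index < unitsPerDay`
-- only ever fires with 0 ≤ index on a nonempty list, so `.toNat` is exact there.
def makePeriodic (unitsPerDay : Int) (separation : Int) (duration : Int) (power : Int) : List Int :=
  let demand := (PySem.List.pyRange 0 unitsPerDay 1).map (fun _ => (0 : Int))
  (PySem.List.pyRange 0 (PySem.Int.floordiv unitsPerDay separation) 1).foldl
    (fun d i =>
      (PySem.List.pyRange 0 (duration + 1) 1).foldl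
        (fun d w =>
          let index := i + separation * i + w
          if index < unitsPerDay then d.set index.toNat power else d) d)
    demand

-- ===== PORT B =====
def makePeriodic_alt (unitsPerDay : Int) (separation : Int) (duration : Int) (power : Int) : List Int :=
  let n := PySem.Int.floordiv unitsPerDay separation
  if n ≤ 0 ∨ unitsPerDay ≤ 0 then
    List.replicate (max unitsPerDay 0).toNat 0
  else
    (PySem.List.pyRange 0 unitsPerDay 1).map (fun j =>
      let stride := separation + 1
      let i := min (PySem.Int.floordiv j stride) (n - 1)
      if 0 ≤ j - i * stride ∧ j - i * stride ≤ duration then power else 0)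

-- ===== PRECONDITION & SPEC =====
-- Pre_ excludes exactly separation = 0, where A raises ZeroDivisionError.
def Pre_makePeriodic (unitsPerDay : Int) (separation : Int) (duration : Int) (power : Int) : Prop := separation ≠ 0
instance (unitsPerDay : Int) (separation : Int) (duration : Int) (power : Int) : Decidable (Pre_makePeriodic unitsPerDay separation duration power) := by unfold Pre_makePeriodic; infer_instance
def pvWitness_makePeriodic : Int × Int × Int × Int := (10, 3, 1, 5)

def Spec_makePeriodic (unitsPerDay : Int) (separation : Int) (duration : Int) (power : Int) (out : List Int) : Prop := out = makePeriodic_alt unitsPerDay separation duration power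
instance (unitsPerDay : Int) (separation : Int) (duration : Int) (power : Int) (out : List Int) : Decidable (Spec_makePeriodic unitsPerDay separation duration power out) := by unfold Spec_makePeriodic; infer_instance

-- ===== CLAIM (what is proved, stated in full; the proofs are below) =====
def Claim_equal_makePeriodic : Prop := ∀ (unitsPerDay : Int) (separation : Int) (duration : Int) (power : Int), Dom_makePeriodic unitsPerDay separation duration power → Pre_makePeriodic unitsPerDay separation duration power → Spec_makePeriodic unitsPerDay separation duration power (makePeriodic unitsPerDay separation duration power)

-- ===== LEMMAS AND PROOFS =====

-- The guarded-set step preserves length.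
theorem pv_step_length (U pow : Int) (d : List Int) (idx : Int) :
    ((if idx < U then d.set idx.toNat pow else d)).length = d.length := by
  split <;> simp

-- getElem? after a fold of guarded sets (all indices nonnegative).
theorem pv_foldl_set_getElem? (U pow : Int) :
    ∀ (L : List Int), (∀ idx ∈ L, 0 ≤ idx) → ∀ (d : List Int) (k : Nat),
    (L.foldl (fun d idx => if idx < U then d.set idx.toNat pow else d) d)[k]? =
      if k < d.length ∧ (∃ idx ∈ L, idx < U ∧ idx.toNat = k) then some pow else d[k]? := by
  intro L
  induction L with
  | nil => intro _ d k; simp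
  | cons a L ih =>
    intro hL d k
    have ha : 0 ≤ a := hL a (by simp)
    have hL' : ∀ idx ∈ L, 0 ≤ idx := fun idx h => hL idx (by simp [h])
    simp only [List.foldl_cons]
    rw [ih hL' _ k]
    rw [pv_step_length]
    by_cases hk : k < d.length
    · by_cases hex : ∃ idx ∈ L, idx < U ∧ idx.toNat = k
      · simp [hk, hex, List.mem_cons]
      · by_cases haU : a < U
        · simp only [haU, if_pos, List.mem_cons]
          rw [List.getElem?_set]
          by_cases hak : a.toNat = k
          · simp [hak, hk, hex, haU]
          · simp [hak, hk, hex, haU]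
        · simp only [haU, if_false]
          simp [hk, hex, haU, List.mem_cons]
    · have h1 : d[k]? = none := by
        rw [List.getElem?_eq_none_iff]; omega
      have h2 : (if a < U then d.set a.toNat pow else d)[k]? = none := by
        rw [List.getElem?_eq_none_iff, pv_step_length]; omega
      simp [hk, h1, h2]

-- Fold of guarded sets preserves length.
theorem pv_foldl_set_length (U pow : Int) (L : List Int) (d : List Int) :
    (L.foldl (fun d idx => if idx < U then d.set idx.toNat pow else d) d).length = d.length := by
  induction L generalizing d with
  | nil => rfl
  | cons a L ih => simp only [List.foldl_cons]; rw [ih, pv_step_length]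

-- Coverage by some periodic block ↔ the clamped-block test of B.
theorem pv_cov_iff (sep n dur j : Int) (hsep : 1 ≤ sep) (hn : 1 ≤ n) (hj : 0 ≤ j) :
    (∃ i, (0 ≤ i ∧ i < n) ∧ ∃ w, (0 ≤ w ∧ w < dur + 1) ∧ i + sep * i + w = j) ↔
      j - (min (PySem.Int.floordiv j (sep + 1)) (n - 1)) * (sep + 1) ≤ dur := by
  have hst : (0 : Int) < sep + 1 := by omega
  set st := sep + 1 with hstdef
  set fd := PySem.Int.floordiv j st with hfd
  have hfd0 : 0 ≤ fd := by
    rw [hfd]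
    exact (PySem.Int.le_floordiv_iff_mul_le hst).2 (by simpa using hj)
  set i0 := min fd (n - 1) with hi0
  have h0 : i0 * st ≤ j := by
    have : i0 ≤ fd := min_le_left _ _
    exact (PySem.Int.le_floordiv_iff_mul_le hst).1 (by omega)
  constructor
  · rintro ⟨i, ⟨hi0', hin⟩, w, ⟨hw0, hw1⟩, heq⟩
    have hieq : i * st = i + sep * i := by ring
    have hi_le_fd : i ≤ fd :=
      (PySem.Int.le_floordiv_iff_mul_le hst).2 (by omega)
    have hi_le : i ≤ i0 := le_min hi_le_fd (by omega)
    have : i * st ≤ i0 * st := mul_le_mul_of_nonneg_right hi_le (by omega)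
    omega
  · intro h
    refine ⟨i0, ⟨le_min hfd0 (by omega), by omega⟩, j - i0 * st, ⟨by omega, by omega⟩, by ring⟩

-- ===== VERDICT (by name: the statement is the Claim_ definition above) =====
theorem makePeriodic_spec : Claim_equal_makePeriodic := by
  intro U sep dur pow _hdom hpre
  unfold Spec_makePeriodic makePeriodic makePeriodic_alt
  set n := PySem.Int.floordiv U sep with hn
  set demand := (PySem.List.pyRange 0 U 1).map (fun _ => (0 : Int)) with hdemand
  set f := fun (d : List Int) (idx : Int) => if idx < U then d.set idx.toNat pow else d with hf
  have hinner : ∀ (i : Int) (d : List Int),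
      (PySem.List.pyRange 0 (dur + 1) 1).foldl
        (fun d w => let index := i + sep * i + w
          if index < U then d.set index.toNat pow else d) d
      = ((PySem.List.pyRange 0 (dur + 1) 1).map (fun w => i + sep * i + w)).foldl f d := by
    intro i d; rw [List.foldl_map]
  simp only [hinner]
  rw [← List.foldl_map (f := fun i => (PySem.List.pyRange 0 (dur + 1) 1).map (fun w => i + sep * i + w))
        (g := fun (d : List Int) l => l.foldl f d)]
  rw [← List.foldl_flatten]
  set Lall := ((PySem.List.pyRange 0 n 1).map
      (fun i => (PySem.List.pyRange 0 (dur + 1) 1).map (fun w => i + sep * i + w))).flatten with hLall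
  by_cases hU : U ≤ 0
  · -- U ≤ 0 : both sides are the empty list
    have hd0 : demand = [] := by
      rw [hdemand, PySem.List.pyRange_one_eq_nil (by omega)]; rfl
    have hlen : (Lall.foldl f demand).length = demand.length := pv_foldl_set_length U pow Lall demand
    have hnil : Lall.foldl f demand = [] := by
      apply List.eq_nil_of_length_eq_zero; rw [hlen, hd0]; rfl
    rw [hnil, if_pos (Or.inr hU)]
    have : (max U 0).toNat = 0 := by omega
    rw [this]; rfl
  · push_neg at hU
    by_cases hn0 : n ≤ 0
    · -- no blocks at all
      have hLnil : Lall = [] := by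
        rw [hLall, PySem.List.pyRange_one_eq_nil (a := 0) (b := n) (by omega)]; rfl
      rw [hLnil, List.foldl_nil, if_pos (Or.inl hn0), hdemand]
      rw [List.map_const']
      congr 1
      simp [PySem.List.length_pyRange_one]
      omega
    · -- main case: U > 0, n ≥ 1, hence sep ≥ 1
      push_neg at hn0
      have hsep0 : sep ≠ 0 := hpre
      have hsep : 1 ≤ sep := by
        by_contra hcon
        push_neg at hcon
        have hneg : sep ≤ -1 := by omega
        have h1 : PySem.Int.floordiv U sep = PySem.Int.floordiv (-U) (-sep) := by
          have := PySem.Int.floordiv_neg_neg (-U) (-sep)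
          simpa using this.symm
        have h2 : PySem.Int.floordiv (-U) (-sep) < 1 := by
          rw [PySem.Int.floordiv_lt_iff_lt_mul (by omega)]
          omega
        omega
      have hst : (0 : Int) < sep + 1 := by omega
      rw [if_neg (by push_neg; constructor <;> omega)]
      -- nonnegativity of every written index
      have hLnonneg : ∀ idx ∈ Lall, 0 ≤ idx := by
        intro idx hidx
        rw [hLall] at hidx
        simp only [List.mem_flatten, List.mem_map] at hidx
        obtain ⟨l, ⟨i, hi, rfl⟩, hidx⟩ := hidx
        simp only [List.mem_map] at hidx
        obtain ⟨w, hw, rfl⟩ := hidx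
        rw [PySem.List.mem_pyRange_one] at hi hw
        nlinarith [mul_nonneg (by omega : (0:Int) ≤ sep) hi.1]
      have hdlen : demand.length = U.toNat := by
        rw [hdemand]; simp [PySem.List.length_pyRange_one]
      -- membership characterisation
      have hmem : ∀ idx : Int, idx ∈ Lall ↔
          ∃ i, (0 ≤ i ∧ i < n) ∧ ∃ w, (0 ≤ w ∧ w < dur + 1) ∧ i + sep * i + w = idx := by
        intro idx
        rw [hLall]
        simp only [List.mem_flatten, List.mem_map, PySem.List.mem_pyRange_one]
        constructor
        · rintro ⟨l, ⟨i, hi, rfl⟩, hidx⟩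
          simp only [List.mem_map, PySem.List.mem_pyRange_one] at hidx
          obtain ⟨w, hw, rfl⟩ := hidx
          exact ⟨i, hi, w, hw, rfl⟩
        · rintro ⟨i, hi, w, hw, rfl⟩
          exact ⟨_, ⟨i, hi, rfl⟩, by
            simp only [List.mem_map, PySem.List.mem_pyRange_one]
            exact ⟨w, hw, rfl⟩⟩
      apply List.ext_getElem?
      intro k
      rw [pv_foldl_set_getElem? U pow Lall hLnonneg demand k]
      by_cases hk : k < U.toNat
      · have hkd : k < demand.length := by omega
        have hrange : (PySem.List.pyRange 0 U 1)[k]? = some ((0 : Int) + k) := by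
          rw [PySem.List.pyRange_one]
          rw [List.getElem?_map, List.getElem?_range (by simpa using hk)]
          rfl
        have hdk : demand[k]? = some 0 := by
          rw [hdemand, List.getElem?_map, hrange]; rfl
        have hrhs : ((PySem.List.pyRange 0 U 1).map (fun j =>
            if 0 ≤ j - (min (PySem.Int.floordiv j (sep + 1)) (n - 1)) * (sep + 1) ∧
               j - (min (PySem.Int.floordiv j (sep + 1)) (n - 1)) * (sep + 1) ≤ dur
            then pow else 0))[k]? = some (if 0 ≤ (k : Int) - (min (PySem.Int.floordiv (k : Int) (sep + 1)) (n - 1)) * (sep + 1) ∧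
               (k : Int) - (min (PySem.Int.floordiv (k : Int) (sep + 1)) (n - 1)) * (sep + 1) ≤ dur
            then pow else 0) := by
          rw [List.getElem?_map, hrange]
          simp
        rw [hdk, hrhs]
        -- the always-nonnegative offset
        have hoff : 0 ≤ (k : Int) - (min (PySem.Int.floordiv (k : Int) (sep + 1)) (n - 1)) * (sep + 1) := by
          have hfd0 : 0 ≤ PySem.Int.floordiv (k : Int) (sep + 1) :=
            (PySem.Int.le_floordiv_iff_mul_le hst).2 (by omega)
          have : (min (PySem.Int.floordiv (k : Int) (sep + 1)) (n - 1)) ≤ PySem.Int.floordiv (k : Int) (sep + 1) := min_le_left _ _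
          have := (PySem.Int.le_floordiv_iff_mul_le hst).1 this
          omega
        have hcov := pv_cov_iff sep n dur (k : Int) hsep (by omega) (by omega)
        have hcond : (∃ idx ∈ Lall, idx < U ∧ idx.toNat = k) ↔
            (k : Int) - (min (PySem.Int.floordiv (k : Int) (sep + 1)) (n - 1)) * (sep + 1) ≤ dur := by
          rw [← hcov]
          constructor
          · rintro ⟨idx, hidx, _hlt, hnat⟩
            have h0 : 0 ≤ idx := hLnonneg idx hidx
            have : idx = (k : Int) := by omega
            rw [hmem] at hidx
            rw [← this]
            exact hidx
          · intro hc
            refine ⟨(k : Int), (hmem _).2 hc, by omega, by omega⟩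
        by_cases hc : (k : Int) - (min (PySem.Int.floordiv (k : Int) (sep + 1)) (n - 1)) * (sep + 1) ≤ dur
        · rw [if_pos ⟨hkd, hcond.2 hc⟩, if_pos ⟨hoff, hc⟩]
        · rw [if_neg (by rintro ⟨_, h⟩; exact hc (hcond.1 h)), if_neg (by rintro ⟨_, h⟩; exact hc h)]
      · have hkd : ¬ k < demand.length := by omega
        rw [if_neg (by rintro ⟨h, _⟩; exact hkd h)]
        have h1 : demand[k]? = none := by rw [List.getElem?_eq_none_iff]; omega
        have h2 : ((PySem.List.pyRange 0 U 1).map (fun j =>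
            if 0 ≤ j - (min (PySem.Int.floordiv j (sep + 1)) (n - 1)) * (sep + 1) ∧
               j - (min (PySem.Int.floordiv j (sep + 1)) (n - 1)) * (sep + 1) ≤ dur
            then pow else 0))[k]? = none := by
          rw [List.getElem?_eq_none_iff]
          simp [PySem.List.length_pyRange_one]
          omega
        rw [h1, h2]
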